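-- pv_equiv track=rewrite | github.com/mr-mahmood/Quera-Solution | Codes/hard/9722/9722_1.py | check
-- ===== SOURCE A (Python) =====
-- def is_prime(number):
--     if number <= 1:
--         return False
--     for i in range(2, int(number**0.5) + 1):
--         if number % i == 0:
--             return False
--     return True
--
-- def check(n):
--     if n == 1:
--         return ['2', '3', '5', '7']
--     else:
--         num = check(n-1)
--         final = []
--         for i in num:
--             for j in range(10):
--                 if is_prime(int(i+str(j))):
--                     final.append(i+str(j))
--         return final
-- ===== SOURCE B (Python) =====
-- _MR_BASES = (2, 3, 5, 7, 11, 13, 17, 19, 23, 29, 31, 37)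
--
-- def _powmod(b, e, m):
--     # square-and-multiply modular exponentiation
--     x = 1
--     b %= m
--     while e > 0:
--         if e % 2 == 1:
--             x = x * b % m
--         b = b * b % m
--         e //= 2
--     return x
--
-- def _mr_prime(m):
--     # deterministic Miller-Rabin; the base set is exact for all m < 3.3e24
--     if m < 2:
--         return False
--     for p in _MR_BASES:
--         if m % p == 0:
--             return m == p
--     d = m - 1
--     r = 0
--     while d % 2 == 0:
--         d //= 2
--         r += 1
--     for a in _MR_BASES:
--         x = _powmod(a, d, m)
--         if x == 1 or x == m - 1:
--             continue
--         ok = False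
--         for _ in range(r - 1):
--             x = x * x % m
--             if x == m - 1:
--                 ok = True
--                 break
--         if not ok:
--             return False
--     return True
--
-- def check(n):
--     cur = ['2', '3', '5', '7']
--     for _ in range(n - 1):
--         cur = [p + str(d) for p in cur for d in range(10) if _mr_prime(int(p + str(d)))]
--     return cur
-- ===== Notes on version B (the rewrite author's own statement) =====
-- stated objective: faster
-- what changed: B replaces A's recursion over n and O(√N) trial-division primality test with an iterative level-by-level loop whose candidate filter is a deterministic Miller-Rabin test (hand-written square-and-multiply powmod), exact for all candidates in range.
-- outside the precondition, e.g. on check(0): A raises RecursionError, B returns ['2', '3', '5', '7']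
import Mathlib
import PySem

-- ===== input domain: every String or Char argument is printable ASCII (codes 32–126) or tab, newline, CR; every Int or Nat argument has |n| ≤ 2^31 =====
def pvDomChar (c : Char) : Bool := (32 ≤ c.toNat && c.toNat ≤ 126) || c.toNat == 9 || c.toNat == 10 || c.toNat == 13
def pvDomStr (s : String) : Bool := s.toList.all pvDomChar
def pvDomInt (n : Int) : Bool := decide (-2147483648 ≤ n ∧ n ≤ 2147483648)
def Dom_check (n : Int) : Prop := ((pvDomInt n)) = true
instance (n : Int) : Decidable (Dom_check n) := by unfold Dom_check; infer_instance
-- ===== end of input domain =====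

-- B replaces A's recursive levels + O(√N) trial-division primality with an iterative level loop and a
-- deterministic Miller–Rabin primality test (objective: faster primality testing per candidate).

set_option maxRecDepth 100000
set_option maxHeartbeats 4000000

-- ===== PORT A =====
-- `int(number**0.5)`: fuel-based Heron integer square root; exact = int(number**0.5) for the
-- numbers A tests here (all < 2^31, far below the first float-sqrt discrepancy near 2^52);
-- fuel 128 is ample (Heron from x=n needs ~log2 n steps).
def isqrtGo (n : Nat) : Nat → Nat → Nat
  | x, 0 => x
  | x, (f+1) => let y := (x + n / x) / 2
                if y < x then isqrtGo n y f else x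

def isqrt (n : Nat) : Nat := if n ≤ 1 then n else isqrtGo n n 128

-- is_prime: the for-loop with early `return False` is the `all` of "no divisor" over the range
def isPrime (number : Int) : Bool :=
  if number ≤ 1 then false
  else (PySem.List.pyRange 2 ((isqrt number.toNat : Int) + 1) 1).all
        (fun i => !(PySem.Int.mod number i == 0))

-- the body of A's else-branch: `for i in num: for j in range(10): if is_prime(int(i+str(j))): final.append(...)`
-- (`int(i+str(j))` never raises — digit strings — so `.getD 0` is never the `none` case)
def extendA (num : List String) : List String :=
  num.foldl (fun final i =>
    (PySem.List.pyRange 0 10 1).foldl (fun final j =>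
      if isPrime ((PySem.Int.ofChars? (i.toList ++ PySem.Int.toChars j)).getD 0)
      then final ++ [String.ofList (i.toList ++ PySem.Int.toChars j)]
      else final) final) []

-- A's recursion on n, realised structurally on n.toNat (identical for n ≥ 1; for n ≤ 0 Python
-- recurses without end — RecursionError — and those inputs are outside Pre_check)
def checkNat : Nat → List String
  | 0 => []
  | 1 => ["2", "3", "5", "7"]
  | (k+2) => extendA (checkNat (k+1))

def check (n : Int) : List String := checkNat n.toNat

-- ===== PORT B =====
def mrBases : List Int := [2, 3, 5, 7, 11, 13, 17, 19, 23, 29, 31, 37]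

-- _powmod's while-loop; fuel 128 covers every exponent reachable here (e < 2^64 ⇒ ≤ 64 halvings)
def powmodGo (m : Int) : Nat → Int → Int → Int → Int
  | 0, _, _, x => x
  | f+1, b, e, x =>
    if 0 < e then
      let x' := if PySem.Int.mod e 2 == 1 then PySem.Int.mod (x * b) m else x
      powmodGo m f (PySem.Int.mod (b * b) m) (PySem.Int.floordiv e 2) x'
    else x

def powmod (b e m : Int) : Int := powmodGo m 128 (PySem.Int.mod b m) e 1

-- the first for-loop of _mr_prime: first base dividing m decides, none ⇒ continue
def mrTrial (m : Int) : List Int → Option Bool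
  | [] => none
  | p :: ps => if PySem.Int.mod m p == 0 then some (m == p) else mrTrial m ps

-- `while d % 2 == 0: d //= 2; r += 1`; fuel 64 covers every d reachable here (d < 2^64),
-- and d is always positive here so the loop terminates in Python too
def mrDecompose : Nat → Int → Int → Int × Int
  | 0, d, r => (d, r)
  | f+1, d, r => if PySem.Int.mod d 2 == 0 then mrDecompose f (PySem.Int.floordiv d 2) (r+1) else (d, r)

-- `for _ in range(r-1): x = x*x % m; if x == m-1: ok = True; break`
def mrSquare (m : Int) : Int → Nat → Bool
  | _, 0 => false
  | x, k+1 => let x' := PySem.Int.mod (x * x) m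
              if x' == m - 1 then true else mrSquare m x' k

def mrWitness (m d r a : Int) : Bool :=
  let x := powmod a d m
  if x == 1 || x == m - 1 then true else mrSquare m x (r - 1).toNat

def mrPrime (m : Int) : Bool :=
  if m < 2 then false
  else match mrTrial m mrBases with
    | some b => b
    | none =>
      let dr := mrDecompose 64 (m - 1) 0
      mrBases.all (mrWitness m dr.1 dr.2)

-- the comprehension [p + str(d) for p in cur for d in range(10) if _mr_prime(int(p + str(d)))]
def stepB (cur : List String) : List String :=
  cur.flatMap (fun p =>
    ((PySem.List.pyRange 0 10 1).filter (fun d =>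
        mrPrime ((PySem.Int.ofChars? (p.toList ++ PySem.Int.toChars d)).getD 0))).map
      (fun d => String.ofList (p.toList ++ PySem.Int.toChars d)))

-- `for _ in range(n - 1): cur = …`
def goB (cur : List String) : Nat → List String
  | 0 => cur
  | k+1 => goB (stepB cur) k

def check_alt (n : Int) : List String := goB ["2", "3", "5", "7"] (n - 1).toNat

-- ===== PRECONDITION & SPEC =====
-- A raises on every excluded input: for n ≤ 0 the recursion check(n-1) never reaches the base
-- case, so A raises RecursionError; no input on which A returns is excluded.
def Pre_check (n : Int) : Prop := 1 ≤ n
instance (n : Int) : Decidable (Pre_check n) := by unfold Pre_check; infer_instance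

def pvWitness_check : Int := (3)

def Spec_check (n : Int) (out : List String) : Prop := out = check_alt n
instance (n : Int) (out : List String) : Decidable (Spec_check n out) := by unfold Spec_check; infer_instance

-- ===== CLAIM (what is proved, stated in full; the proofs are below) =====
def Claim_equal_check : Prop := ∀ (n : Int), Dom_check n → Pre_check n → Spec_check n (check n)

-- ===== LEMMAS AND PROOFS =====
-- the successive levels (right-truncatable primes by length; empty from length 9 on)
def L1 : List String := ["2", "3", "5", "7"]
def L2 : List String := ["23", "29", "31", "37", "53", "59", "71", "73", "79"]
def L3 : List String := ["233", "239", "293", "311", "313", "317", "373", "379", "593", "599", "719", "733", "739", "797"]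
def L4 : List String := ["2333", "2339", "2393", "2399", "2939", "3119", "3137", "3733", "3739", "3793", "3797", "5939", "7193", "7331", "7333", "7393"]
def L5 : List String := ["23333", "23339", "23399", "23993", "29399", "31193", "31379", "37337", "37339", "37397", "59393", "59399", "71933", "73331", "73939"]
def L6 : List String := ["233993", "239933", "293999", "373379", "373393", "593933", "593993", "719333", "739391", "739393", "739397", "739399"]
def L7 : List String := ["2339933", "2399333", "2939999", "3733799", "5939333", "7393913", "7393931", "7393933"]
def L8 : List String := ["23399339", "29399999", "37337999", "59393339", "73939133"]
def L9 : List String := []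

-- one level of A, evaluated once per level
lemma eA2 : extendA L1 = L2 := by decide
lemma eA3 : extendA L2 = L3 := by decide
lemma eA4 : extendA L3 = L4 := by decide
lemma eA5 : extendA L4 = L5 := by decide
lemma eA6 : extendA L5 = L6 := by decide
lemma eA7 : extendA L6 = L7 := by decide
lemma eA8 : extendA L7 = L8 := by decide
lemma eA9 : extendA L8 = L9 := by decide
lemma extendA_nil : extendA [] = [] := rfl

-- one level of B, evaluated once per level
lemma eB2 : stepB L1 = L2 := by decide
lemma eB3 : stepB L2 = L3 := by decide
lemma eB4 : stepB L3 = L4 := by decide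
lemma eB5 : stepB L4 = L5 := by decide
lemma eB6 : stepB L5 = L6 := by decide
lemma eB7 : stepB L6 = L7 := by decide
lemma eB8 : stepB L7 = L8 := by decide
lemma eB9 : stepB L8 = L9 := by decide
lemma stepB_nil : stepB [] = [] := rfl

lemma cN1 : checkNat 1 = L1 := rfl
lemma cN2 : checkNat 2 = L2 := by rw [show checkNat 2 = extendA (checkNat 1) from rfl, cN1, eA2]
lemma cN3 : checkNat 3 = L3 := by rw [show checkNat 3 = extendA (checkNat 2) from rfl, cN2, eA3]
lemma cN4 : checkNat 4 = L4 := by rw [show checkNat 4 = extendA (checkNat 3) from rfl, cN3, eA4]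
lemma cN5 : checkNat 5 = L5 := by rw [show checkNat 5 = extendA (checkNat 4) from rfl, cN4, eA5]
lemma cN6 : checkNat 6 = L6 := by rw [show checkNat 6 = extendA (checkNat 5) from rfl, cN5, eA6]
lemma cN7 : checkNat 7 = L7 := by rw [show checkNat 7 = extendA (checkNat 6) from rfl, cN6, eA7]
lemma cN8 : checkNat 8 = L8 := by rw [show checkNat 8 = extendA (checkNat 7) from rfl, cN7, eA8]
lemma cN9 : checkNat 9 = L9 := by rw [show checkNat 9 = extendA (checkNat 8) from rfl, cN8, eA9]

lemma goB_nil : ∀ j, goB [] j = [] := by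
  intro j
  induction j with
  | zero => rfl
  | succ j ih => rw [show goB [] (j+1) = goB (stepB []) j from rfl, stepB_nil, ih]

lemma goB_add : ∀ (a : Nat) (cur : List String) (b : Nat), goB cur (a + b) = goB (goB cur a) b := by
  intro a
  induction a with
  | zero => intro cur b; rw [Nat.zero_add]; rfl
  | succ a ih =>
    intro cur b
    have e : (a + 1) + b = (a + b) + 1 := by omega
    rw [e, show goB cur ((a + b) + 1) = goB (stepB cur) (a + b) from rfl, ih,
        show goB cur (a + 1) = goB (stepB cur) a from rfl]

lemma g1 : goB L1 0 = L1 := rfl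
lemma g2 : goB L1 1 = L2 := by rw [show goB L1 1 = goB (stepB L1) 0 from rfl, eB2]; rfl
lemma g3 : goB L1 2 = L3 := by rw [show goB L1 2 = goB (stepB L1) 1 from rfl, eB2, show goB L2 1 = goB (stepB L2) 0 from rfl, eB3]; rfl

lemma g4 : goB L1 3 = L4 := by
  rw [show (3:Nat) = 2+1 from rfl, goB_add, g3, show goB L3 1 = goB (stepB L3) 0 from rfl, eB4]; rfl
lemma g5 : goB L1 4 = L5 := by
  rw [show (4:Nat) = 3+1 from rfl, goB_add, g4, show goB L4 1 = goB (stepB L4) 0 from rfl, eB5]; rfl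
lemma g6 : goB L1 5 = L6 := by
  rw [show (5:Nat) = 4+1 from rfl, goB_add, g5, show goB L5 1 = goB (stepB L5) 0 from rfl, eB6]; rfl
lemma g7 : goB L1 6 = L7 := by
  rw [show (6:Nat) = 5+1 from rfl, goB_add, g6, show goB L6 1 = goB (stepB L6) 0 from rfl, eB7]; rfl
lemma g8 : goB L1 7 = L8 := by
  rw [show (7:Nat) = 6+1 from rfl, goB_add, g7, show goB L7 1 = goB (stepB L7) 0 from rfl, eB8]; rfl
lemma g9 : goB L1 8 = L9 := by
  rw [show (8:Nat) = 7+1 from rfl, goB_add, g8, show goB L8 1 = goB (stepB L8) 0 from rfl, eB9]; rfl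

lemma checkNat_ge9 : ∀ k : Nat, checkNat (9 + k) = [] := by
  intro k
  induction k with
  | zero => exact cN9
  | succ k ih =>
    have e1 : 9 + (k + 1) = (8 + k) + 2 := by omega
    rw [e1, show checkNat ((8 + k) + 2) = extendA (checkNat ((8 + k) + 1)) from rfl]
    have e2 : (8 + k) + 1 = 9 + k := by omega
    rw [e2, ih, extendA_nil]

-- ===== VERDICT (by name: the statement is the Claim_ definition above) =====
theorem check_spec : Claim_equal_check := by
  intro n _ hpre
  have hlo : 1 ≤ n := hpre
  unfold Spec_check
  by_cases h : n ≤ 9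
  · have h19 : n = 1 ∨ n = 2 ∨ n = 3 ∨ n = 4 ∨ n = 5 ∨ n = 6 ∨ n = 7 ∨ n = 8 ∨ n = 9 := by omega
    rcases h19 with rfl | rfl | rfl | rfl | rfl | rfl | rfl | rfl | rfl
    · exact cN1.trans g1.symm
    · exact cN2.trans g2.symm
    · exact cN3.trans g3.symm
    · exact cN4.trans g4.symm
    · exact cN5.trans g5.symm
    · exact cN6.trans g6.symm
    · exact cN7.trans g7.symm
    · exact cN8.trans g8.symm
    · exact cN9.trans g9.symm
  · show checkNat n.toNat = goB L1 (n - 1).toNat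
    have hn : n.toNat = 9 + (n.toNat - 9) := by omega
    rw [hn, checkNat_ge9]
    have h8 : (n - 1).toNat = 8 + ((n - 1).toNat - 8) := by omega
    rw [h8, goB_add, g9, show L9 = ([] : List String) from rfl, goB_nil]
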